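-- pv_equiv track=rewrite | github.com/pypi-data/pypi-mirror-310 | packages/psplpy/psplpy-1.22.0-py3-none-any.whl/psplpy/scripts/block_jetbrains.py | _extract_substring
-- ===== SOURCE A (Python) =====
-- def _extract_substring(string: str, search_string: str):
--     result = []
--     start = 0
--     while True:
--         index = string.find(search_string, start)
--         if index == -1:
--             break
--         # extract the search string until to the \n
--         end_index = string.find('\n', index)
--         if end_index == -1:
--             end_index = len(string)
--         substring = string[index + len(search_string):end_index].strip()
--         result.append(substring)
--         start = end_index + 1
--     return result
-- ===== SOURCE B (Python) =====
-- def _extract_substring(string: str, search_string: str):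
--     result = []
--     for line in string.split('\n'):
--         idx = line.find(search_string)
--         if idx != -1:
--             result.append(line[idx + len(search_string):].strip())
--     return result
-- ===== Notes on version B (the rewrite author's own statement) =====
-- stated objective: simpler
-- what changed: Replaces the moving-cursor while-loop with absolute find/slice index bookkeeping by a plain split('\n') followed by one find per line, exploiting that the original captures exactly one (first) match per line.
-- intended difference: When search_string itself contains a newline and occurs in string, A returns truncated artefacts of its clamped slice (e.g. [''] for ('a\nb','a\n')) while B returns [], the intended value for a per-line extractor since no single line can contain a multi-line search string. — e.g. on _extract_substring("a\nb", "a\n"): A returns [""], B returns []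
import Mathlib
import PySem

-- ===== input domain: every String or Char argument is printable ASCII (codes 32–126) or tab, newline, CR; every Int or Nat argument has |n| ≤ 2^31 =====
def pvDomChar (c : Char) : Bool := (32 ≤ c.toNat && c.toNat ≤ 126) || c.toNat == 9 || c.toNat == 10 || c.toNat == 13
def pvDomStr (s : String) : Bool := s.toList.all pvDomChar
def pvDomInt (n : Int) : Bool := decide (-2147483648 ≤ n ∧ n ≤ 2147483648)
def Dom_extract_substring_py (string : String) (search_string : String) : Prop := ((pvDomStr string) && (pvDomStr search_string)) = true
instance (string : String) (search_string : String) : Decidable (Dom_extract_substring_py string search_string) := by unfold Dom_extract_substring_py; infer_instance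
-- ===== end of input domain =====

-- B replaces A's moving-cursor while-loop (absolute find/slice indices) by split('\n') + one find per line;
-- objective: simpler. On search strings that contain '\n' and occur in the input, A and B intentionally differ (see D_ below).

-- ===== PORT A =====
-- while-True loop of A, fuel-guarded (fuel string.length+2 always suffices: the cursor strictly grows each iteration)
def extractLoopA (cs sub : List Char) (start : Int) : Nat → List String
  | 0 => []
  | fuel + 1 =>
    let index := PySem.Chars.findFrom cs sub start none
    if index = -1 then []
    else
      let e0 := PySem.Chars.findFrom cs ['\n'] index none
      let endIndex : Int := if e0 = -1 then (cs.length : Int) else e0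
      String.ofList (PySem.Chars.strip (PySem.Chars.slice cs (some (index + (sub.length : Int))) (some endIndex)))
        :: extractLoopA cs sub (endIndex + 1) fuel

def extract_substring_py (string : String) (search_string : String) : List String :=
  extractLoopA string.toList search_string.toList 0 (string.toList.length + 2)

-- ===== PORT B =====
def extract_substring_py_alt (string : String) (search_string : String) : List String :=
  let sub := search_string.toList
  (PySem.Chars.splitOn string.toList ['\n']).foldl
    (fun acc line =>
      let idx := PySem.Chars.find line sub
      if idx = -1 then acc
      else acc ++ [String.ofList (PySem.Chars.strip (PySem.Chars.slice line (some (idx + (sub.length : Int))) none))])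
    []

-- ===== PRECONDITION & SPEC =====
-- When search_string contains a newline and occurs in string, A returns truncated artefacts of its
-- clamped slice (e.g. [""] for ("a\nb", "a\n")) while B returns [], the intended value for a
-- per-line extractor since no single line can contain a multi-line search string.
def D_extract_substring_py (string : String) (search_string : String) : Prop :=
  '\n' ∈ search_string.toList ∧ search_string.toList <:+: string.toList

instance (string : String) (search_string : String) : Decidable (D_extract_substring_py string search_string) := by
  unfold D_extract_substring_py; infer_instance

def Spec_extract_substring_py (string : String) (search_string : String) (out : List String) : Prop :=
  ¬ D_extract_substring_py string search_string → out = extract_substring_py_alt string search_string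

instance (string : String) (search_string : String) (out : List String) : Decidable (Spec_extract_substring_py string search_string out) := by
  unfold Spec_extract_substring_py; infer_instance

def pvDiffWitness_extract_substring_py : String × String := ("a\nb", "a\n")

def pvDiffWitnessOut_extract_substring_py : (List String) × (List String) := ([""], [])

-- ===== CLAIM (what is proved, stated in full; the proofs are below) =====
def Claim_unchanged_extract_substring_py : Prop := ∀ (string : String) (search_string : String), Dom_extract_substring_py string search_string → Spec_extract_substring_py string search_string (extract_substring_py string search_string)

def Claim_changed_extract_substring_py : Prop := Dom_extract_substring_py (pvDiffWitness_extract_substring_py.1) (pvDiffWitness_extract_substring_py.2) ∧ D_extract_substring_py (pvDiffWitness_extract_substring_py.1) (pvDiffWitness_extract_substring_py.2) ∧ extract_substring_py (pvDiffWitness_extract_substring_py.1) (pvDiffWitness_extract_substring_py.2) = pvDiffWitnessOut_extract_substring_py.1 ∧ extract_substring_py_alt (pvDiffWitness_extract_substring_py.1) (pvDiffWitness_extract_substring_py.2) = pvDiffWitnessOut_extract_substring_py.2 ∧ pvDiffWitnessOut_extract_substring_py.1 ≠ pvDiffWitnessOut_extract_substring_py.2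

def Claim_exact_extract_substring_py : Prop := ∀ (string : String) (search_string : String), Dom_extract_substring_py string search_string → D_extract_substring_py string search_string → extract_substring_py string search_string ≠ extract_substring_py_alt string search_string

-- ===== LEMMAS AND PROOFS =====
def nlSplit : List Char → List (List Char)
  | [] => [[]]
  | c :: rest =>
    if c = '\n' then [] :: nlSplit rest
    else (c :: (nlSplit rest).headI) :: (nlSplit rest).tail

theorem nlSplit_ne_nil (cs : List Char) : nlSplit cs ≠ [] := by
  cases cs with
  | nil => simp [nlSplit]
  | cons c rest => simp only [nlSplit]; split <;> simp

theorem nlSplit_headI_tail (cs : List Char) : (nlSplit cs).headI :: (nlSplit cs).tail = nlSplit cs := by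
  cases h : nlSplit cs with
  | nil => exact absurd h (nlSplit_ne_nil cs)
  | cons a t => simp

theorem go_spec (l : List Char) : ∀ (fuel : Nat) (cur : List Char) (acc : List (List Char)),
    l.length ≤ fuel →
    PySem.Chars.splitOn.go ['\n'] fuel l cur acc
      = acc.reverse ++ (cur.reverse ++ (nlSplit l).headI) :: (nlSplit l).tail := by
  induction l with
  | nil =>
    intro fuel cur acc _
    cases fuel <;> simp [PySem.Chars.splitOn.go, nlSplit]
  | cons c rest ih =>
    intro fuel cur acc h
    cases fuel with
    | zero => simp at h
    | succ f =>
      by_cases hc : c = '\n'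
      · subst hc
        have h1 : PySem.Chars.splitOn.go ['\n'] (f+1) ('\n' :: rest) cur acc
            = PySem.Chars.splitOn.go ['\n'] f rest [] (cur.reverse :: acc) := by
          simp [PySem.Chars.splitOn.go, List.isPrefixOf]
        rw [h1, ih f [] (cur.reverse :: acc) (by simpa using h)]
        simp [nlSplit, nlSplit_headI_tail]
      · have h1 : PySem.Chars.splitOn.go ['\n'] (f+1) (c :: rest) cur acc
            = PySem.Chars.splitOn.go ['\n'] f rest (c :: cur) acc := by
          simp only [PySem.Chars.splitOn.go, List.isPrefixOf, Bool.and_true]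
          rw [if_neg (by simpa using fun h => hc h.symm)]
        rw [h1, ih f (c :: cur) acc (by simp at h ⊢; omega)]
        simp [nlSplit, hc]

theorem splitOn_nl (cs : List Char) : PySem.Chars.splitOn cs ['\n'] = nlSplit cs := by
  rw [PySem.Chars.splitOn, go_spec cs (cs.length + 1) [] [] (by omega)]
  simp [nlSplit_headI_tail]

theorem nlSplit_no_nl {cs : List Char} (h : '\n' ∉ cs) : nlSplit cs = [cs] := by
  induction cs with
  | nil => simp [nlSplit]
  | cons c rest ih =>
    simp only [List.mem_cons, not_or] at h
    simp [nlSplit, Ne.symm h.1, ih h.2]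

theorem nlSplit_append {l : List Char} (rest : List Char) (h : '\n' ∉ l) :
    nlSplit (l ++ '\n' :: rest) = l :: nlSplit rest := by
  induction l with
  | nil => simp [nlSplit]
  | cons c t ih =>
    simp only [List.mem_cons, not_or] at h
    simp [nlSplit, Ne.symm h.1, ih h.2]

theorem nlSplit_headI_prefix (cs : List Char) : (nlSplit cs).headI <+: cs := by
  induction cs with
  | nil => simp [nlSplit]
  | cons c rest ih =>
    by_cases hc : c = '\n'
    · simp [nlSplit, hc]
    · simpa [nlSplit, hc] using ih

theorem nlSplit_mem_no_nl {cs p : List Char} (hp : p ∈ nlSplit cs) : '\n' ∉ p := by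
  induction cs generalizing p with
  | nil => simp [nlSplit] at hp; simp [hp]
  | cons c rest ih =>
    by_cases hc : c = '\n'
    · subst hc; simp [nlSplit] at hp
      rcases hp with h | h
      · simp [h]
      · exact ih h
    · simp [nlSplit, hc] at hp
      rcases hp with h | h
      · subst h
        have h2 : (nlSplit rest).headI ∈ nlSplit rest := by
          rw [← nlSplit_headI_tail rest]; exact List.mem_cons_self
        simp [Ne.symm hc, ih h2]
      · exact ih (by rw [← nlSplit_headI_tail rest]; exact List.mem_cons_of_mem _ h)

theorem nlSplit_mem_infix {cs p : List Char} (hp : p ∈ nlSplit cs) : p <:+: cs := by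
  induction cs generalizing p with
  | nil => simp [nlSplit] at hp; simp [hp]
  | cons c rest ih =>
    by_cases hc : c = '\n'
    · subst hc; simp [nlSplit] at hp
      rcases hp with h | h
      · simp [h]
      · exact ((ih h).trans ⟨['\n'], [], by simp⟩)
    · simp [nlSplit, hc] at hp
      rcases hp with h | h
      · subst h
        exact ((List.prefix_cons_inj c).mpr (nlSplit_headI_prefix rest)).isInfix
      · exact ((ih (by rw [← nlSplit_headI_tail rest]; exact List.mem_cons_of_mem _ h)).trans ⟨[c], [], by simp⟩)

theorem find_eq_first {s sub : List Char} {i : Nat} (h1 : sub <+: s.drop i)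
    (h2 : ∀ j < i, ¬ sub <+: s.drop j) : PySem.Chars.find s sub = (i : Int) := by
  have hin : PySem.Chars.isIn sub s = true :=
    (PySem.Chars.exists_prefix_drop_iff_isIn sub s).mp ⟨i, h1⟩
  have hnn : 0 ≤ PySem.Chars.find s sub :=
    (PySem.Chars.find_nonneg_iff s sub).mpr ((PySem.Chars.isIn_iff_infix sub s).mp hin)
  obtain ⟨hpre, hmin⟩ := PySem.Chars.find_spec hnn
  have : (PySem.Chars.find s sub).toNat = i := by
    rcases lt_trichotomy (PySem.Chars.find s sub).toNat i with h | h | h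
    · exact absurd hpre (h2 _ h)
    · exact h
    · exact absurd h1 (hmin i h)
  omega

theorem no_straddle {sub l : List Char} (rest : List Char) (hnl : '\n' ∉ sub) {j : Nat}
    (hj : j ≤ l.length) (h : sub <+: (l ++ '\n' :: rest).drop j) : sub <+: l.drop j := by
  rw [List.drop_append_of_le_length hj] at h
  by_cases hlen : sub.length ≤ (l.drop j).length
  · rw [List.prefix_iff_eq_take] at h ⊢
    rwa [List.take_append_of_le_length hlen] at h
  · exfalso
    apply hnl
    have hidx : (l.drop j).length < sub.length := by omega
    have := h.getElem (i := (l.drop j).length) hidx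
    rw [List.getElem_append_right (le_refl _)] at this
    simp only [Nat.sub_self, List.getElem_cons_zero] at this
    exact this ▸ List.getElem_mem hidx

theorem findFrom_shift (pre rest sub : List Char) (k : Int) (hk : 0 ≤ k) :
    PySem.Chars.findFrom (pre ++ rest) sub ((pre.length : Int) + k) none
      = (if PySem.Chars.findFrom rest sub k none = -1 then -1
         else (pre.length : Int) + PySem.Chars.findFrom rest sub k none) := by
  have hr1 := PySem.Chars.neg_one_le_find (List.drop k.toNat rest) sub
  simp only [PySem.Chars.findFrom, List.length_append,
    if_neg (show ¬((pre.length : Int) + k < 0) by omega), if_neg (not_lt.mpr hk)]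
  rw [show (((pre.length + rest.length : Nat) : Int)).toNat = (pre ++ rest).length by
        rw [List.length_append]; omega,
      List.take_length,
      show ((rest.length : Int)).toNat = rest.length by omega, List.take_length,
      show ((pre.length : Int) + k).toNat = pre.length + k.toNat by omega]
  simp only [List.drop_append, List.drop_eq_nil_of_le (show pre.length ≤ pre.length + k.toNat by omega),
    Nat.add_sub_cancel_left, List.nil_append]
  split_ifs <;> omega

theorem findFrom_past {s sub : List Char} {start : Int} (h : (s.length : Int) < start) :
    PySem.Chars.findFrom s sub start none = -1 := by
  have h0 : (0:Int) ≤ s.length := by positivity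
  simp only [PySem.Chars.findFrom, if_neg (show ¬(start < 0) by omega)]
  rw [if_pos h]


theorem findFrom_bounds {s sub : List Char} {start : Int} (h0 : 0 ≤ start)
    (h : PySem.Chars.findFrom s sub start none ≠ -1) :
    start ≤ PySem.Chars.findFrom s sub start none ∧
      PySem.Chars.findFrom s sub start none ≤ (s.length : Int) := by
  have hr1 := PySem.Chars.neg_one_le_find (List.drop start.toNat (List.take ((s.length:Int)).toNat s)) sub
  have hr2 := PySem.Chars.find_le_length (List.drop start.toNat (List.take ((s.length:Int)).toNat s)) sub
  simp only [PySem.Chars.findFrom, if_neg (not_lt.mpr h0)] at h ⊢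
  rw [show (((s.length):Int)).toNat = s.length by omega, List.take_length] at h hr1 hr2 ⊢
  simp only [List.length_drop] at hr2
  split_ifs at h ⊢ <;> omega

theorem slice_shift (pre rest : List Char) (a b : Int) (ha : 0 ≤ a) (hb : 0 ≤ b) :
    PySem.Chars.slice (pre ++ rest) (some ((pre.length : Int) + a)) (some ((pre.length : Int) + b))
      = PySem.Chars.slice rest (some a) (some b) := by
  rw [show ((pre.length : Int) + a) = ((pre.length + a.toNat : Nat) : Int) by omega,
      show ((pre.length : Int) + b) = ((pre.length + b.toNat : Nat) : Int) by omega,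
      show (a : Int) = ((a.toNat : Nat) : Int) by omega,
      show (b : Int) = ((b.toNat : Nat) : Int) by omega]
  simp only [PySem.Chars.slice_eq_listSlice, PySem.List.slice_natCast, Int.toNat_natCast]
  rw [Nat.add_sub_add_left]
  simp [List.drop_append, List.drop_eq_nil_of_le (show pre.length ≤ pre.length + a.toNat by omega)]

theorem loop_congr_start (cs sub : List Char) (s1 s2 : Int)
    (h : PySem.Chars.findFrom cs sub s1 none = PySem.Chars.findFrom cs sub s2 none) :
    ∀ fuel, extractLoopA cs sub s1 fuel = extractLoopA cs sub s2 fuel := by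
  intro fuel
  cases fuel with
  | zero => rfl
  | succ f => simp only [extractLoopA, h]

theorem loop_shift (pre rest sub : List Char) :
    ∀ (fuel : Nat) (k : Int), 0 ≤ k →
      extractLoopA (pre ++ rest) sub ((pre.length : Int) + k) fuel = extractLoopA rest sub k fuel := by
  intro fuel
  induction fuel with
  | zero => intro k hk; rfl
  | succ f ih =>
    intro k hk
    simp only [extractLoopA]
    rw [findFrom_shift pre rest sub k hk]
    by_cases h : PySem.Chars.findFrom rest sub k none = -1
    · simp [h]
    · have hi : 0 ≤ PySem.Chars.findFrom rest sub k none := le_trans hk (findFrom_bounds hk h).1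
      rw [if_neg h, if_neg (by omega), findFrom_shift pre rest ['\n'] _ hi]
      by_cases h2 : PySem.Chars.findFrom rest ['\n'] (PySem.Chars.findFrom rest sub k none) none = -1
      · simp only [h2, if_pos, List.length_append, if_neg h]
        rw [show ((pre.length + rest.length : Nat) : Int) = (pre.length : Int) + (rest.length : Int) by push_cast; ring,
            show ((pre.length : Int) + PySem.Chars.findFrom rest sub k none + (sub.length : Int))
              = (pre.length : Int) + (PySem.Chars.findFrom rest sub k none + (sub.length : Int)) by ring,
            slice_shift pre rest _ _ (by omega) (by omega),
            show ((pre.length : Int) + (rest.length : Int) + 1) = (pre.length : Int) + ((rest.length : Int) + 1) by ring,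
            ih ((rest.length : Int) + 1) (by omega)]
      · have he : 0 ≤ PySem.Chars.findFrom rest ['\n'] (PySem.Chars.findFrom rest sub k none) none :=
          le_trans hi (findFrom_bounds hi h2).1
        rw [if_neg h2, if_neg (by omega), if_neg h2,
            show ((pre.length : Int) + PySem.Chars.findFrom rest sub k none + (sub.length : Int))
              = (pre.length : Int) + (PySem.Chars.findFrom rest sub k none + (sub.length : Int)) by ring,
            slice_shift pre rest _ _ (by omega) (by omega),
            show ((pre.length : Int) + PySem.Chars.findFrom rest ['\n'] (PySem.Chars.findFrom rest sub k none) none + 1)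
              = (pre.length : Int) + (PySem.Chars.findFrom rest ['\n'] (PySem.Chars.findFrom rest sub k none) none + 1) by ring,
            ih _ (by omega)]
        simp [h]

theorem loop_past {cs sub : List Char} {start : Int} (h : (cs.length : Int) < start) :
    ∀ fuel, extractLoopA cs sub start fuel = [] := by
  intro fuel
  cases fuel with
  | zero => rfl
  | succ f => simp [extractLoopA, findFrom_past h]

theorem exists_first_nl {cs : List Char} (h : '\n' ∈ cs) :
    ∃ l rest, '\n' ∉ l ∧ cs = l ++ '\n' :: rest := by
  have hd : List.dropWhile (fun c => !(c == '\n')) cs ≠ [] := by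
    intro hnil
    rw [List.dropWhile_eq_nil_iff] at hnil
    simpa using hnil _ h
  obtain ⟨c, rest, hcr⟩ := List.exists_cons_of_ne_nil hd
  have hc : c = '\n' := by
    have := List.head_dropWhile_not (fun c => !(c == '\n')) hd
    simp [hcr] at this
    exact this
  refine ⟨List.takeWhile (fun c => !(c == '\n')) cs, rest, ?_, ?_⟩
  · intro hmem
    simpa using List.mem_takeWhile_imp hmem
  · conv_lhs => rw [← List.takeWhile_append_dropWhile (p := fun c => !(c == '\n')) (l := cs)]
    rw [hcr, hc]

theorem find_in_line {sub l : List Char} (rest : List Char) (hnl : '\n' ∉ sub)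
    (hf : PySem.Chars.find l sub ≠ -1) :
    PySem.Chars.find (l ++ '\n' :: rest) sub = PySem.Chars.find l sub := by
  have hnn : 0 ≤ PySem.Chars.find l sub := by
    have := PySem.Chars.neg_one_le_find l sub; omega
  obtain ⟨hpre, hmin⟩ := PySem.Chars.find_spec hnn
  have hle : (PySem.Chars.find l sub).toNat ≤ l.length := by
    have := PySem.Chars.find_le_length l sub; omega
  rw [show PySem.Chars.find l sub = ((PySem.Chars.find l sub).toNat : Int) by omega]
  apply find_eq_first
  · rw [List.drop_append_of_le_length hle]
    exact hpre.trans (List.prefix_append _ _)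
  · intro j hj hcon
    exact hmin j hj (no_straddle rest hnl (by omega) hcon)

theorem newline_after {l : List Char} (rest : List Char) (hl : '\n' ∉ l) {i : Nat} (hi : i ≤ l.length) :
    PySem.Chars.findFrom (l ++ '\n' :: rest) ['\n'] (i : Int) none = (l.length : Int) := by
  rw [PySem.Chars.findFrom_natCast _ _ i (by simp only [List.length_append]; simp; omega)]
  have hfind : PySem.Chars.find (List.drop i (l ++ '\n' :: rest)) ['\n'] = ((l.length - i : Nat) : Int) := by
    apply find_eq_first
    · rw [List.drop_append_of_le_length hi, List.drop_append,
          List.drop_eq_nil_of_le (by simp), List.length_drop]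
      simp only [Nat.sub_self, List.drop_zero, List.nil_append]
      exact ⟨rest, rfl⟩
    · intro j hj hcon
      rw [List.drop_append_of_le_length hi] at hcon
      rw [List.drop_append_of_le_length (by simp; omega : j ≤ (List.drop i l).length)] at hcon
      rw [List.drop_drop] at hcon
      have hlt : j + i < l.length := by omega
      have h0 := hcon.getElem (i := 0) (by simp)
      rw [List.getElem_append_left (by simp; omega)] at h0
      simp only [List.getElem_cons_zero] at h0
      have hm : (List.drop (i + j) l)[0]'(by simp; omega) ∈ l :=
        List.mem_of_mem_drop (List.getElem_mem _)
      rw [← h0] at hm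
      exact hl hm
  rw [hfind, if_neg (by omega)]
  omega

theorem find_skip_line {sub l : List Char} (rest : List Char) (hnl : '\n' ∉ sub)
    (hf : PySem.Chars.find l sub = -1) :
    PySem.Chars.find (l ++ '\n' :: rest) sub
      = (if PySem.Chars.find rest sub = -1 then -1
         else ((l.length : Int) + 1) + PySem.Chars.find rest sub) := by
  have hno : ∀ j ≤ l.length, ¬ sub <+: (l ++ '\n' :: rest).drop j := by
    intro j hj hp
    have h1 := no_straddle rest hnl hj hp
    have h2 : sub <:+: l := h1.isInfix.trans (List.drop_suffix j l).isInfix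
    exact absurd h2 ((PySem.Chars.find_eq_neg_one_iff l sub).mp hf)
  have hdrop : ∀ j, l.length + 1 ≤ j → (l ++ '\n' :: rest).drop j = rest.drop (j - (l.length + 1)) := by
    intro j hj
    rw [show l ++ '\n' :: rest = (l ++ ['\n']) ++ rest by simp, List.drop_append,
        List.drop_eq_nil_of_le (by simp; omega), List.nil_append, List.length_append]
    simp
  by_cases hr : PySem.Chars.find rest sub = -1
  · rw [if_pos hr]
    apply (PySem.Chars.find_eq_neg_one_iff _ sub).mpr
    intro hinf
    obtain ⟨j, hj⟩ := (PySem.Chars.exists_prefix_drop_iff_isIn sub _).mpr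
      ((PySem.Chars.isIn_iff_infix sub _).mpr hinf)
    by_cases hjl : j ≤ l.length
    · exact hno j hjl hj
    · rw [hdrop j (by omega)] at hj
      exact absurd (hj.isInfix.trans (List.drop_suffix _ rest).isInfix)
        ((PySem.Chars.find_eq_neg_one_iff rest sub).mp hr)
  · have hnn : 0 ≤ PySem.Chars.find rest sub := by
      have := PySem.Chars.neg_one_le_find rest sub; omega
    obtain ⟨hpre, hmin⟩ := PySem.Chars.find_spec hnn
    rw [if_neg hr, show PySem.Chars.find rest sub = (((PySem.Chars.find rest sub).toNat : Nat) : Int) by omega,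
        show ((l.length : Int) + 1) + (((PySem.Chars.find rest sub).toNat : Nat) : Int)
          = ((l.length + 1 + (PySem.Chars.find rest sub).toNat : Nat) : Int) by push_cast; ring]
    apply find_eq_first
    · rw [hdrop _ (by omega), Nat.add_sub_cancel_left]
      exact hpre
    · intro j hj hcon
      by_cases hjl : j ≤ l.length
      · exact hno j hjl hcon
      · rw [hdrop j (by omega)] at hcon
        exact hmin _ (by omega) hcon

def lineOut (sub l : List Char) : List String :=
  if PySem.Chars.find l sub = -1 then []
  else [String.ofList (PySem.Chars.strip
    (PySem.Chars.slice l (some (PySem.Chars.find l sub + (sub.length : Int))) none))]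

theorem drop_line (l rest : List Char) : (l ++ '\n' :: rest).drop (l.length + 1) = rest := by
  rw [show l ++ '\n' :: rest = (l ++ ['\n']) ++ rest by simp, List.drop_append,
      List.drop_eq_nil_of_le (by simp), List.nil_append, List.length_append]
  simp

theorem loop_no_nl {sub cs : List Char} (hcs : '\n' ∉ cs) :
    ∀ (fuel : Nat), cs.length + 2 ≤ fuel → extractLoopA cs sub 0 fuel = lineOut sub cs := by
  intro fuel hfuel
  obtain ⟨f, rfl⟩ : ∃ f, fuel = f + 1 := ⟨fuel - 1, by omega⟩
  simp only [extractLoopA, PySem.Chars.findFrom_zero]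
  by_cases hf : PySem.Chars.find cs sub = -1
  · simp [hf, lineOut]
  · have hnn : 0 ≤ PySem.Chars.find cs sub := by
      have := PySem.Chars.neg_one_le_find cs sub; omega
    have hle : (PySem.Chars.find cs sub).toNat ≤ cs.length := by
      have := PySem.Chars.find_le_length cs sub; omega
    have hlen : (PySem.Chars.find cs sub).toNat + sub.length ≤ cs.length := by
      have := (PySem.Chars.find_spec hnn).1.length_le
      simp at this; omega
    rw [if_neg hf, show PySem.Chars.find cs sub = (((PySem.Chars.find cs sub).toNat : Nat) : Int) by omega]
    rw [(PySem.Chars.findFrom_natCast_eq_neg_one_iff cs ['\n'] (PySem.Chars.find cs sub).toNat hle).mpr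
      (by
        intro hinf
        exact hcs (List.mem_of_mem_drop ((List.singleton_infix_iff _ _).mp hinf)))]
    rw [if_pos rfl, lineOut, if_neg hf,
        show PySem.Chars.find cs sub = (((PySem.Chars.find cs sub).toNat : Nat) : Int) by omega]
    rw [show (((PySem.Chars.find cs sub).toNat : Nat) : Int) + (sub.length : Int)
          = (((PySem.Chars.find cs sub).toNat + sub.length : Nat) : Int) by push_cast; ring]
    rw [show ((cs.length : Nat) : Int) + 1 = (((cs.length + 1 : Nat)) : Int) by push_cast; ring]
    rw [loop_past (by omega) f]
    simp only [PySem.Chars.slice_eq_listSlice, PySem.List.slice_from_natCast, Int.toNat_natCast]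
    rw [show ((((PySem.Chars.find cs sub).toNat : Nat) : Int)) + ((sub.length : Nat) : Int)
          = ((((PySem.Chars.find cs sub).toNat + sub.length : Nat)) : Int) by push_cast; ring,
        PySem.List.slice_natCast, List.take_of_length_le (by simp)]

theorem loop_lines {sub : List Char} (hnl : '\n' ∉ sub) :
    ∀ (n : Nat) (cs : List Char), cs.length ≤ n → ∀ (fuel : Nat), cs.length + 2 ≤ fuel →
      extractLoopA cs sub 0 fuel = (nlSplit cs).flatMap (lineOut sub) := by
  intro n
  induction n with
  | zero =>
    intro cs hcs fuel hfuel
    have : cs = [] := List.eq_nil_of_length_eq_zero (by omega)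
    subst this
    rw [nlSplit_no_nl (by simp), loop_no_nl (by simp) fuel hfuel]
    simp
  | succ n ih =>
    intro cs hcs fuel hfuel
    by_cases hmem : '\n' ∈ cs
    · obtain ⟨l, rest, hl, rfl⟩ := exists_first_nl hmem
      have hlen : (l ++ '\n' :: rest).length = l.length + 1 + rest.length := by simp; omega
      rw [nlSplit_append rest hl, List.flatMap_cons]
      by_cases hf : PySem.Chars.find l sub = -1
      · have h0 : PySem.Chars.findFrom (l ++ '\n' :: rest) sub 0 none
            = PySem.Chars.findFrom (l ++ '\n' :: rest) sub ((l.length : Int) + 1) none := by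
          rw [PySem.Chars.findFrom_zero, find_skip_line rest hnl hf,
              show ((l.length : Int) + 1) = (((l.length + 1 : Nat)) : Int) by push_cast; ring,
              PySem.Chars.findFrom_natCast _ _ (l.length + 1) (by omega),
              drop_line l rest]
        rw [loop_congr_start _ _ _ _ h0 fuel,
            show ((l.length : Int) + 1) = (((l ++ ['\n']).length : Nat) : Int) + 0 by simp,
            show l ++ '\n' :: rest = (l ++ ['\n']) ++ rest by simp,
            loop_shift (l ++ ['\n']) rest sub fuel 0 le_rfl,
            ih rest (by omega) fuel (by omega)]
        simp [lineOut, hf]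
      · obtain ⟨f, rfl⟩ : ∃ f, fuel = f + 1 := ⟨fuel - 1, by omega⟩
        have hnn : 0 ≤ PySem.Chars.find l sub := by
          have := PySem.Chars.neg_one_le_find l sub; omega
        have hle : (PySem.Chars.find l sub).toNat ≤ l.length := by
          have := PySem.Chars.find_le_length l sub; omega
        have hlen2 : (PySem.Chars.find l sub).toNat + sub.length ≤ l.length := by
          have := (PySem.Chars.find_spec hnn).1.length_le
          simp at this; omega
        simp only [extractLoopA, PySem.Chars.findFrom_zero]
        rw [find_in_line rest hnl hf, if_neg hf,
            show PySem.Chars.find l sub = (((PySem.Chars.find l sub).toNat : Nat) : Int) by omega,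
            newline_after rest hl hle, if_neg (by omega),
            show (((PySem.Chars.find l sub).toNat : Nat) : Int) + (sub.length : Int)
              = ((((PySem.Chars.find l sub).toNat + sub.length : Nat)) : Int) by push_cast; ring]
        rw [show ((l.length : Nat) : Int) + 1 = (((l ++ ['\n']).length : Nat) : Int) + 0 by simp,
            show l ++ '\n' :: rest = (l ++ ['\n']) ++ rest by simp,
            loop_shift (l ++ ['\n']) rest sub f 0 le_rfl,
            ih rest (by omega) f (by omega)]
        simp only [PySem.Chars.slice_eq_listSlice, PySem.List.slice_natCast]
        rw [show (l ++ ['\n']) ++ rest = l ++ '\n' :: rest by simp,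
            List.drop_append_of_le_length (by omega),
            List.take_append_of_le_length (by simp),
            List.take_of_length_le (by simp)]
        rw [lineOut, if_neg hf,
            show PySem.Chars.find l sub = (((PySem.Chars.find l sub).toNat : Nat) : Int) by omega,
            show (((PySem.Chars.find l sub).toNat : Nat) : Int) + (sub.length : Int)
              = ((((PySem.Chars.find l sub).toNat + sub.length : Nat)) : Int) by push_cast; ring]
        simp only [PySem.Chars.slice_eq_listSlice, PySem.List.slice_from_natCast]
        rw [Int.toNat_natCast, List.singleton_append]
    · rw [nlSplit_no_nl hmem, loop_no_nl hmem fuel hfuel]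
      simp

theorem alt_eq_flatMap (string search_string : String) :
    extract_substring_py_alt string search_string
      = (nlSplit string.toList).flatMap (lineOut search_string.toList) := by
  unfold extract_substring_py_alt
  dsimp only
  rw [splitOn_nl]
  rw [PySem.List.foldl_congr_mem _ _
        (fun acc line => acc ++ lineOut search_string.toList line) _
        (by
          intro acc line _
          simp only [lineOut]
          split_ifs <;> simp),
      PySem.List.foldl_append_eq_flatMap, List.nil_append]

theorem flatMap_nil_of_no_find {sub cs : List Char}
    (h : ∀ p ∈ nlSplit cs, PySem.Chars.find p sub = -1) :
    (nlSplit cs).flatMap (lineOut sub) = [] := by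
  rw [List.flatMap_eq_nil_iff]
  intro p hp
  simp [lineOut, h p hp]

theorem main_unchanged (string search_string : String)
    (hD : ¬ D_extract_substring_py string search_string) :
    extract_substring_py string search_string = extract_substring_py_alt string search_string := by
  rw [alt_eq_flatMap]
  unfold extract_substring_py
  by_cases hnl : '\n' ∈ search_string.toList
  · have hninf : ¬ search_string.toList <:+: string.toList := fun h => hD ⟨hnl, h⟩
    obtain ⟨f, hf⟩ : ∃ f, string.toList.length + 2 = f + 1 := ⟨string.toList.length + 1, rfl⟩
    rw [hf]
    simp only [extractLoopA, PySem.Chars.findFrom_zero]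
    rw [if_pos ((PySem.Chars.find_eq_neg_one_iff _ _).mpr hninf)]
    rw [flatMap_nil_of_no_find (fun p hp => (PySem.Chars.find_eq_neg_one_iff _ _).mpr
      (fun hin => hninf (hin.trans (nlSplit_mem_infix hp))))]
  · exact loop_lines hnl string.toList.length string.toList le_rfl _ le_rfl

theorem main_tight (string search_string : String)
    (hD : D_extract_substring_py string search_string) :
    extract_substring_py string search_string ≠ extract_substring_py_alt string search_string := by
  rw [alt_eq_flatMap]
  rw [flatMap_nil_of_no_find (fun p hp => (PySem.Chars.find_eq_neg_one_iff _ _).mpr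
    (fun hin => nlSplit_mem_no_nl hp (hin.subset hD.1)))]
  unfold extract_substring_py
  obtain ⟨f, hf⟩ : ∃ f, string.toList.length + 2 = f + 1 := ⟨string.toList.length + 1, rfl⟩
  rw [hf]
  simp only [extractLoopA, PySem.Chars.findFrom_zero]
  rw [if_neg ((PySem.Chars.find_ne_neg_one_iff _ _).mpr hD.2)]
  simp

-- ===== VERDICT (by name: the statement is the Claim_ definition above) =====
theorem extract_substring_py_spec : Claim_unchanged_extract_substring_py := by
  intro string search_string _ hD
  exact main_unchanged string search_string hD

theorem extract_substring_py_changed : Claim_changed_extract_substring_py := by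
  unfold Claim_changed_extract_substring_py; decide

theorem extract_substring_py_tight : Claim_exact_extract_substring_py := by
  intro string search_string _ hD
  exact main_tight string search_string hD
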